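-- pv_equiv track=rewrite | github.com/GuyKeogh/wiki_verify | source/dataparsing/text_tagging.py | tag_comparisons
-- ===== SOURCE A (Python) =====
-- def tag_comparisons(text_of_tag, unique_terms_citations_of_tag, data):
--     for elem in text_of_tag:
--         if data[elem[1]][2] != "pass":
--             if elem[0] not in unique_terms_citations_of_tag:
--                 data[elem[1]][2] = "fail"
--             else:
--                 data[elem[1]][2] = "pass"
--     return data
-- ===== SOURCE B (Python) =====
-- def tag_comparisons(text_of_tag, unique_terms_citations_of_tag, data):
--     # Precompute which indices carry a citation term, then rewrite each
--     # distinct tagged index exactly once. (Like A, mutates rows in place.)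
--     terms = set(unique_terms_citations_of_tag)
--     good = {idx for term, idx in text_of_tag if term in terms}
--     for idx in dict.fromkeys(idx for _, idx in text_of_tag):
--         row = data[idx]
--         if row[2] != "pass":
--             row[2] = "pass" if idx in good else "fail"
--     return data
-- ===== Notes on version B (the rewrite author's own statement) =====
-- stated objective: alternative
-- what changed: A's stateful scan over text_of_tag (re-reading and re-writing data[idx][2] once per text element) is replaced by a set-aggregation pass (which indices carry a citation term) followed by a single rewrite of each distinct tagged index.
import Mathlib
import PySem

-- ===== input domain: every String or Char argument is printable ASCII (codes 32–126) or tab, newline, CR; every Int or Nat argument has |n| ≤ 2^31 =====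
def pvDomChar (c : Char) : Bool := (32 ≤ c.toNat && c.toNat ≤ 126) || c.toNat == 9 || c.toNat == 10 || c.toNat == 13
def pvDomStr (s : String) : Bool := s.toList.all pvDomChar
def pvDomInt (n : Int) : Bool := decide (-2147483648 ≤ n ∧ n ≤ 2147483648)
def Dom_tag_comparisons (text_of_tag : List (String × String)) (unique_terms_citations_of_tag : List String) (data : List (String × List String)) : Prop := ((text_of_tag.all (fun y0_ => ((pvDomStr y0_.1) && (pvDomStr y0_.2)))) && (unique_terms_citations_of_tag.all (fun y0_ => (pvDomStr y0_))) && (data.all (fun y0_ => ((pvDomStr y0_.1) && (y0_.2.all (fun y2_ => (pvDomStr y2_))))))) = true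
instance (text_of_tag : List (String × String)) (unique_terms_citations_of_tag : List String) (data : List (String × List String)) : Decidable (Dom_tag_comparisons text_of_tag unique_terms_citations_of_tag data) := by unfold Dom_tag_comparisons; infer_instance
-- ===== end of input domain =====

-- B replaces A's stateful scan over text_of_tag by a set-aggregation pass
-- (touched indices / indices with a citation term) followed by one rewrite
-- pass over the data rows; both Pythons mutate `data`'s rows in place, the
-- equivalence proved here is about the returned value (that same dict).

-- ===== PORT A =====
-- A mutates the dict `data` in place and returns it; the port threads the dict
-- through a fold over text_of_tag, branch for branch.
def tag_comparisons (text_of_tag : List (String × String)) (unique_terms_citations_of_tag : List String) (data : List (String × List String)) : List (String × List String) :=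
  (text_of_tag.foldl (fun d elem =>
      match PySem.Dict.get? d elem.2 with
      | none => d          -- Python: KeyError here (excluded by Pre_)
      | some row =>
        match PySem.List.pyGet? row 2 with
        | none => d        -- Python: IndexError here (excluded by Pre_)
        | some v =>
          if v ≠ "pass" then
            if ¬ (unique_terms_citations_of_tag.contains elem.1) then
              PySem.Dict.insert d elem.2 (PySem.List.pySetD row 2 "fail")
            else
              PySem.Dict.insert d elem.2 (PySem.List.pySetD row 2 "pass")
          else d)
    (PySem.Dict.mk data)).items

-- ===== PORT B =====
-- One pass over text_of_tag builds the set of "good" indices (some citation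
-- term present); then each distinct tagged index is rewritten exactly once.
def tag_comparisons_alt (text_of_tag : List (String × String)) (unique_terms_citations_of_tag : List String) (data : List (String × List String)) : List (String × List String) :=
  let terms : PySem.Set String := PySem.Set.ofList unique_terms_citations_of_tag
  let good : PySem.Set String :=
    PySem.Set.ofList ((text_of_tag.filter (fun e => terms.contains e.1)).map (fun e => e.2))
  ((PySem.List.dedup (text_of_tag.map (fun e => e.2))).foldl (fun d idx =>
      match PySem.Dict.get? d idx with
      | none => d          -- Python: KeyError here (excluded by Pre_)
      | some row =>
        match PySem.List.pyGet? row 2 with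
        | none => d        -- Python: IndexError here (excluded by Pre_)
        | some v =>
          if v = "pass" then d
          else PySem.Dict.insert d idx
                 (PySem.List.pySetD row 2 (if good.contains idx then "pass" else "fail")))
    (PySem.Dict.mk data)).items

-- ===== PRECONDITION & SPEC =====
-- `data` is a Python dict, so duplicate keys in the association list are
-- unrepresentable on the Python side: Pre_ requires the keys to be distinct.
-- The other conjunct excludes exactly the inputs on which A raises:
-- KeyError (a tagged key missing from data) or IndexError (its row shorter than 3).
def Pre_tag_comparisons (text_of_tag : List (String × String)) (unique_terms_citations_of_tag : List String) (data : List (String × List String)) : Prop :=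
  (data.map Prod.fst).Nodup ∧
  ∀ e ∈ text_of_tag, ∃ p ∈ data, p.1 = e.2 ∧ 3 ≤ p.2.length
instance (text_of_tag : List (String × String)) (unique_terms_citations_of_tag : List String) (data : List (String × List String)) : Decidable (Pre_tag_comparisons text_of_tag unique_terms_citations_of_tag data) := by unfold Pre_tag_comparisons; infer_instance

def pvWitness_tag_comparisons : (List (String × String)) × List String × (List (String × List String)) :=
  ([("alice", "k1"), ("bob", "k2")], ["alice"], [("k1", ["x", "y", "fail"]), ("k2", ["x", "y", ""])])

def Spec_tag_comparisons (text_of_tag : List (String × String)) (unique_terms_citations_of_tag : List String) (data : List (String × List String)) (out : List (String × List String)) : Prop := out = tag_comparisons_alt text_of_tag unique_terms_citations_of_tag data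
instance (text_of_tag : List (String × String)) (unique_terms_citations_of_tag : List String) (data : List (String × List String)) (out : List (String × List String)) : Decidable (Spec_tag_comparisons text_of_tag unique_terms_citations_of_tag data out) := by unfold Spec_tag_comparisons; infer_instance

-- ===== CLAIM (what is proved, stated in full; the proofs are below) =====
def Claim_equal_tag_comparisons : Prop := ∀ (text_of_tag : List (String × String)) (unique_terms_citations_of_tag : List String) (data : List (String × List String)), Dom_tag_comparisons text_of_tag unique_terms_citations_of_tag data → Pre_tag_comparisons text_of_tag unique_terms_citations_of_tag data → Spec_tag_comparisons text_of_tag unique_terms_citations_of_tag data (tag_comparisons text_of_tag unique_terms_citations_of_tag data)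

-- ===== LEMMAS AND PROOFS =====
-- Net effect of A's repeated rewrites of one row, with b = "any citation term
-- among this key's text elements":
def pvG1 (b : Bool) (row : List String) : List String :=
  match PySem.List.pyGet? row 2 with
  | none => row
  | some v => if v = "pass" then row else PySem.List.pySetD row 2 (if b then "pass" else "fail")
-- pvTch t k: some text element has index k; pvGood u t k: one of them has a citation term.
def pvTch (t : List (String × String)) (k : String) : Bool := t.any (fun e => e.2 == k)
def pvGood (u : List String) (t : List (String × String)) (k : String) : Bool :=
  t.any (fun e => e.2 == k && u.contains e.1)
-- The common normal form both ports are reduced to.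
def pvFinal (u : List String) (t : List (String × String)) (data : List (String × List String)) : List (String × List String) :=
  data.map (fun p => (p.1, if pvTch t p.1 then pvG1 (pvGood u t p.1) p.2 else p.2))

lemma pvGet_lt (row : List String) (v : String) (h : PySem.List.pyGet? row 2 = some v) :
    2 < row.length := by
  by_contra hlt
  rw [PySem.List.pyGet?, PySem.List.pyIdx?] at h
  rw [if_pos (by norm_num), if_neg (by exact_mod_cast hlt)] at h
  simp at h

lemma pvGet_set (row : List String) (w : String) (h : 2 < row.length) :
    PySem.List.pyGet? (PySem.List.pySetD row 2 w) 2 = some w := by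
  rw [PySem.List.pySetD_of_nonneg row w (by norm_num)]
  simp [PySem.List.pyGet?, PySem.List.pyIdx?, List.getElem?_set, h]

lemma pvGood_imp_tch (u : List String) (t : List (String × String)) (k : String)
    (h : pvGood u t k = true) : pvTch t k = true := by
  simp only [pvGood, List.any_eq_true, Bool.and_eq_true] at h
  rcases h with ⟨e, he, hk, _⟩
  exact List.any_eq_true.mpr ⟨e, he, hk⟩

lemma pvRowStep (row : List String) (b trest grest : Bool)
    (himp : grest = true → trest = true) :
    (if trest then pvG1 grest (pvG1 b row) else pvG1 b row) = pvG1 (b || grest) row := by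
  cases hg : PySem.List.pyGet? row 2 with
  | none => simp [pvG1, hg]
  | some v =>
    have hlen := pvGet_lt row v hg
    by_cases hv : v = "pass"
    · simp [pvG1, hg, hv]
    · have hset : ∀ w, pvG1 grest (PySem.List.pySetD row 2 w) =
        (if w = "pass" then PySem.List.pySetD row 2 w
         else PySem.List.pySetD row 2 (if grest then "pass" else "fail")) := by
        intro w
        rw [pvG1, pvGet_set row w hlen]
        split
        · simp_all
        · have : ∀ w', PySem.List.pySetD (PySem.List.pySetD row 2 w) 2 w' = PySem.List.pySetD row 2 w' := by
            intro w'
            rw [PySem.List.pySetD_of_nonneg row w (by norm_num),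
              PySem.List.pySetD_of_nonneg _ w' (by norm_num),
              PySem.List.pySetD_of_nonneg row w' (by norm_num), List.set_set]
          simp_all
      have hb : ∀ b', pvG1 b' row = PySem.List.pySetD row 2 (if b' then "pass" else "fail") := by
        intro b'; rw [pvG1, hg]; simp [hv]
      cases b with
      | true =>
        rw [Bool.true_or, hb true]
        cases trest <;> simp [hset]
      | false =>
        rw [Bool.false_or, hb false]
        cases htr : trest with
        | true => simp only [if_true]; rw [hset, hb grest]; simp
        | false =>
          have hgr : grest = false := by
            cases hgr : grest with
            | true => rw [himp hgr] at htr; exact absurd htr (by simp)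
            | false => rfl
          subst hgr
          simp [hb]

def pvApplyKey (d : PySem.Dict String (List String)) (k : String) (b : Bool) : PySem.Dict String (List String) :=
  match PySem.Dict.get? d k with
  | none => d
  | some row =>
    match PySem.List.pyGet? row 2 with
    | none => d
    | some v =>
      if v = "pass" then d
      else PySem.Dict.insert d k (PySem.List.pySetD row 2 (if b then "pass" else "fail"))
def pvUpd (data : List (String × List String)) (k : String) (b : Bool) : List (String × List String) :=
  data.map (fun p => if p.1 == k then (p.1, pvG1 b p.2) else p)

lemma pvApplyKey_eq_upd (data : List (String × List String)) (k : String) (b : Bool)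
    (hnd : (data.map Prod.fst).Nodup) :
    pvApplyKey (PySem.Dict.mk data) k b = PySem.Dict.mk (pvUpd data k b) := by
  induction data with
  | nil => simp [pvApplyKey, PySem.Dict.get?, pvUpd]
  | cons p rest ih =>
    simp only [List.map_cons, List.nodup_cons] at hnd
    by_cases hk : p.1 = k
    · have hrest : ∀ q ∈ rest, q.1 ≠ k := by
        intro q hq he
        exact hnd.1 (by rw [hk, ← he]; exact List.mem_map_of_mem hq)
      have hget : PySem.Dict.get? (PySem.Dict.mk (p :: rest)) k = some p.2 := by
        simp [PySem.Dict.get?, show (p.1 == k) = true by simpa using hk]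
      have hupd : pvUpd (p :: rest) k b = (p.1, pvG1 b p.2) :: rest := by
        simp only [pvUpd, List.map_cons, if_pos (show (p.1 == k) = true by simpa using hk)]
        rw [show (rest.map fun q => if q.1 == k then (q.1, pvG1 b q.2) else q) = rest from
          (List.map_congr_left fun q hq => by rw [if_neg (by simpa using hrest q hq)]; rfl).trans (List.map_id rest)]
      rw [hupd, pvApplyKey]
      simp only [hget]
      cases hg : PySem.List.pyGet? p.2 2 with
      | none =>
        rw [show pvG1 b p.2 = p.2 by rw [pvG1, hg]]
      | some v =>
        by_cases hv : v = "pass"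
        · simp only [if_pos hv]
          rw [show pvG1 b p.2 = p.2 by rw [pvG1, hg]; simp [hv]]
        · simp only [if_neg hv]
          have hcont : PySem.Dict.contains (PySem.Dict.mk (p :: rest)) k = true := by
            simp [PySem.Dict.contains]
            exact Or.inl hk
          rw [PySem.Dict.insert, if_pos hcont]
          simp only []
          congr 1
          simp only [List.map_cons, if_pos (show (p.1 == k) = true by simpa using hk)]
          congr 1
          · rw [hk, show pvG1 b p.2 = PySem.List.pySetD p.2 2 (if b then "pass" else "fail") by
              rw [pvG1, hg]; simp [hv]]
          · refine (List.map_congr_left fun q hq => ?_).trans (List.map_id rest)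
            rw [if_neg (by simpa using hrest q hq)]; rfl
    · have hne : (p.1 == k) = false := by simpa using hk
      have hupd : pvUpd (p :: rest) k b = p :: pvUpd rest k b := by
        simp only [pvUpd, List.map_cons, if_neg (by simp [hne] : ¬ ((p.1 == k) = true))]
      have hitems : (pvApplyKey (PySem.Dict.mk (p :: rest)) k b).items
          = p :: (pvApplyKey (PySem.Dict.mk rest) k b).items := by
        rw [pvApplyKey, pvApplyKey]
        rw [show PySem.Dict.get? (PySem.Dict.mk (p :: rest)) k = PySem.Dict.get? (PySem.Dict.mk rest) k by
          simp [PySem.Dict.get?, hne]]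
        cases hget : PySem.Dict.get? (PySem.Dict.mk rest) k with
        | none => rfl
        | some row =>
          simp only []
          cases hpg : PySem.List.pyGet? row 2 with
          | none => rfl
          | some v =>
            simp only []
            by_cases hv : v = "pass"
            · simp [hv]
            · simp only [if_neg hv]
              rw [PySem.Dict.insert, PySem.Dict.insert]
              rw [show PySem.Dict.contains (PySem.Dict.mk (p :: rest)) k = PySem.Dict.contains (PySem.Dict.mk rest) k by
                simp [PySem.Dict.contains, hne]]
              cases hc : PySem.Dict.contains (PySem.Dict.mk rest) k with
              | true => simp [hk]
              | false => simp
      apply PySem.Dict.ext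
      rw [hitems, ih hnd.2, hupd]

lemma pvUpd_fst (data : List (String × List String)) (k : String) (b : Bool) :
    (pvUpd data k b).map Prod.fst = data.map Prod.fst := by
  rw [pvUpd, List.map_map]
  refine List.map_congr_left fun p _ => ?_
  simp only [Function.comp_apply]
  split <;> rfl

lemma pvFinal_upd (u : List String) (e : String × String) (rest : List (String × String))
    (data : List (String × List String)) :
    pvFinal u rest (pvUpd data e.2 (u.contains e.1)) = pvFinal u (e :: rest) data := by
  rw [pvFinal, pvFinal, pvUpd, List.map_map]
  refine List.map_congr_left fun p _ => ?_
  by_cases hpk : p.1 = e.2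
  · have hbeq : (p.1 == e.2) = true := by simpa using hpk
    have hbeq' : (e.2 == p.1) = true := by simpa using hpk.symm
    have hq : (if (p.1 == e.2) = true then (p.1, pvG1 (u.contains e.1) p.2) else p)
        = (p.1, pvG1 (u.contains e.1) p.2) := if_pos hbeq
    simp only [Function.comp_apply, hq]
    have htch : pvTch (e :: rest) p.1 = true := by simp [pvTch, hbeq']
    have hgood : pvGood u (e :: rest) p.1 = (u.contains e.1 || pvGood u rest p.1) := by
      simp [pvGood, hbeq']
    rw [htch, hgood]
    exact congrArg (Prod.mk p.1)
      (pvRowStep p.2 (u.contains e.1) (pvTch rest p.1) (pvGood u rest p.1)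
        (pvGood_imp_tch u rest p.1))
  · have hbeq : (p.1 == e.2) = false := by simpa using hpk
    have hbeq' : (e.2 == p.1) = false := by simpa using (Ne.symm hpk)
    have hq : (if (p.1 == e.2) = true then (p.1, pvG1 (u.contains e.1) p.2) else p) = p :=
      if_neg (by simp [hbeq])
    simp only [Function.comp_apply, hq]
    have htch : pvTch (e :: rest) p.1 = pvTch rest p.1 := by simp [pvTch, hbeq']
    have hgood : pvGood u (e :: rest) p.1 = pvGood u rest p.1 := by simp [pvGood, hbeq']
    rw [htch, hgood]

-- A's fold computes pvFinal.
lemma pvFoldA (u : List String) :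
    ∀ (t : List (String × String)) (data : List (String × List String)),
    (data.map Prod.fst).Nodup →
    (t.foldl (fun d elem =>
      match PySem.Dict.get? d elem.2 with
      | none => d
      | some row =>
        match PySem.List.pyGet? row 2 with
        | none => d
        | some v =>
          if v ≠ "pass" then
            if ¬ (u.contains elem.1) then
              PySem.Dict.insert d elem.2 (PySem.List.pySetD row 2 "fail")
            else
              PySem.Dict.insert d elem.2 (PySem.List.pySetD row 2 "pass")
          else d)
      (PySem.Dict.mk data)).items = pvFinal u t data := by
  intro t
  induction t with
  | nil =>
    intro data _
    simp [pvFinal, pvTch]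
  | cons e rest ih =>
    intro data hnd
    rw [List.foldl_cons]
    have hstep : (match PySem.Dict.get? (PySem.Dict.mk data) e.2 with
      | none => PySem.Dict.mk data
      | some row =>
        match PySem.List.pyGet? row 2 with
        | none => PySem.Dict.mk data
        | some v =>
          if v ≠ "pass" then
            if ¬ (u.contains e.1) then
              PySem.Dict.insert (PySem.Dict.mk data) e.2 (PySem.List.pySetD row 2 "fail")
            else
              PySem.Dict.insert (PySem.Dict.mk data) e.2 (PySem.List.pySetD row 2 "pass")
          else PySem.Dict.mk data)
        = pvApplyKey (PySem.Dict.mk data) e.2 (u.contains e.1) := by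
      rw [pvApplyKey]
      cases PySem.Dict.get? (PySem.Dict.mk data) e.2 with
      | none => rfl
      | some row =>
        simp only []
        cases PySem.List.pyGet? row 2 with
        | none => rfl
        | some v =>
          simp only []
          by_cases hv : v = "pass"
          · simp [hv]
          · cases u.contains e.1 <;> simp [hv]
    rw [hstep, pvApplyKey_eq_upd data e.2 (u.contains e.1) hnd]
    rw [ih (pvUpd data e.2 (u.contains e.1)) (by rw [pvUpd_fst]; exact hnd)]
    exact pvFinal_upd u e rest data

lemma pvContains_ofList {α : Type} [BEq α] [LawfulBEq α] (u : List α) (x : α) :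
    (PySem.Set.ofList u).contains x = u.contains x := by
  have := PySem.Set.mem_ofList u x
  by_cases hx : x ∈ u <;> simp_all

-- B's "good" membership test computes pvGood.
lemma pvGoodSet_eq (u : List String) (t : List (String × String)) (k : String) :
    (PySem.Set.ofList ((t.filter (fun e => (PySem.Set.ofList u).contains e.1)).map (fun e => e.2))).contains k
      = pvGood u t k := by
  rw [pvContains_ofList, pvGood]
  induction t with
  | nil => rfl
  | cons e rest ih =>
    rw [List.filter_cons]
    cases hc : (PySem.Set.ofList u).contains e.1 with
    | true =>
      rw [pvContains_ofList] at hc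
      simp only [if_pos rfl, List.map_cons, List.contains_cons, List.any_cons, ← ih, hc]
      cases he : (k == e.2) <;>
        cases hr : ((rest.filter (fun e => (PySem.Set.ofList u).contains e.1)).map (fun e => e.2)).contains k <;>
        simp_all [BEq.comm] <;> exact fun x hx => hr x k hx rfl
    | false =>
      rw [pvContains_ofList] at hc
      simp only [Bool.false_eq_true, if_false, List.any_cons, ← ih, hc]
      simp

-- Membership in the deduplicated index list computes pvTch.
lemma pvDedup_contains (t : List (String × String)) (k : String) :
    (PySem.List.dedup (t.map (fun e => e.2))).contains k = pvTch t k := by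
  by_cases h : pvTch t k = true
  · rw [h]
    simp only [pvTch, List.any_eq_true] at h
    rcases h with ⟨e, he, hk⟩
    simp only [List.contains_iff_exists_mem_beq, PySem.List.mem_dedup]
    exact ⟨e.2, List.mem_map_of_mem he, by have := eq_of_beq hk; simp [this]⟩
  · rw [Bool.eq_false_iff.mpr h, ← Bool.not_eq_true]
    simp only [List.contains_iff_exists_mem_beq, PySem.List.mem_dedup]
    rintro ⟨x, hx, hkx⟩
    rcases List.mem_map.mp hx with ⟨e, he, hk⟩
    exact h (List.any_eq_true.mpr ⟨e, he, by simp [hk, ← (by simpa using hkx : k = x)]⟩)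

-- B's per-distinct-key fold is a pointwise map over data.
lemma pvFoldKeys (g : String → Bool) :
    ∀ (ks : List String) (data : List (String × List String)),
    (data.map Prod.fst).Nodup → ks.Nodup →
    (ks.foldl (fun d k => pvApplyKey d k (g k)) (PySem.Dict.mk data)).items
      = data.map (fun p => if ks.contains p.1 then (p.1, pvG1 (g p.1) p.2) else p) := by
  intro ks
  induction ks with
  | nil => intro data _ _; simp
  | cons k rest ih =>
    intro data hnd hks
    rw [List.nodup_cons] at hks
    rw [List.foldl_cons, pvApplyKey_eq_upd data k (g k) hnd,
      ih (pvUpd data k (g k)) (by rw [pvUpd_fst]; exact hnd) hks.2]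
    rw [pvUpd, List.map_map]
    refine List.map_congr_left fun p _ => ?_
    by_cases hp : p.1 = k
    · have hkr : rest.contains p.1 = false := by
        rw [Bool.eq_false_iff, Ne, List.contains_iff_exists_mem_beq]
        rintro ⟨x, hx, hpx⟩
        exact hks.1 (by rwa [← (by simpa using hpx : p.1 = x), hp] at hx)
      simp [Function.comp, hp, hkr, List.contains_cons]
      exact fun h => absurd h hks.1
    · have hbeq : (p.1 == k) = false := by simpa using hp
      simp [Function.comp, hbeq, hp, List.contains_cons]

-- B's pass computes pvFinal.
lemma pvFoldB (u : List String) (t : List (String × String)) (data : List (String × List String))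
    (hnd : (data.map Prod.fst).Nodup) :
    tag_comparisons_alt t u data = pvFinal u t data := by
  rw [show tag_comparisons_alt t u data
      = ((PySem.List.dedup (t.map (fun e => e.2))).foldl (fun d idx =>
          match PySem.Dict.get? d idx with
          | none => d
          | some row =>
            match PySem.List.pyGet? row 2 with
            | none => d
            | some v =>
              if v = "pass" then d
              else PySem.Dict.insert d idx
                     (PySem.List.pySetD row 2
                       (if (PySem.Set.ofList ((t.filter (fun e => (PySem.Set.ofList u).contains e.1)).map (fun e => e.2))).contains idx
                        then "pass" else "fail")))
        (PySem.Dict.mk data)).items from rfl]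
  have hbody : (fun (d : PySem.Dict String (List String)) (idx : String) =>
      match PySem.Dict.get? d idx with
      | none => d
      | some row =>
        match PySem.List.pyGet? row 2 with
        | none => d
        | some v =>
          if v = "pass" then d
          else PySem.Dict.insert d idx
                 (PySem.List.pySetD row 2
                   (if (PySem.Set.ofList ((t.filter (fun e => (PySem.Set.ofList u).contains e.1)).map (fun e => e.2))).contains idx
                    then "pass" else "fail")))
      = fun d idx => pvApplyKey d idx (pvGood u t idx) := by
    funext d idx
    rw [pvApplyKey, pvGoodSet_eq]
  rw [hbody, pvFoldKeys (fun k => pvGood u t k) (PySem.List.dedup (t.map (fun e => e.2))) data hnd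
    (PySem.List.nodup_dedup _), pvFinal]
  refine List.map_congr_left fun p _ => ?_
  rw [pvDedup_contains]
  cases pvTch t p.1 <;> simp

-- ===== VERDICT (by name: the statement is the Claim_ definition above) =====
theorem tag_comparisons_spec : Claim_equal_tag_comparisons := by
  intro t u data _ hpre
  unfold Spec_tag_comparisons
  have hA : tag_comparisons t u data = pvFinal u t data := by
    unfold tag_comparisons
    exact pvFoldA u t data hpre.1
  rw [hA, pvFoldB u t data hpre.1]
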